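-- pv_equiv track=rewrite | github.com/Jeongjiw00/sparta_algorithm | programmers/python/문자열 묶기.py | solution
-- ===== SOURCE A (Python) =====
-- def solution(strArr):
--     m = {}
--     for s in strArr:
--         if len(s) in m:
--             m[len(s)] += 1
--         else:
--             m[len(s)] = 1
--     return max(m.values())
-- ===== SOURCE B (Python) =====
-- def solution(strArr):
--     lengths = sorted(len(s) for s in strArr)
--     best = 0
--     run = 0
--     prev = None
--     for L in lengths:
--         run = run + 1 if prev == L else 1
--         if best < run:
--             best = run
--         prev = L
--     return best
-- ===== Notes on version B (the rewrite author's own statement) =====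
-- stated objective: alternative
-- what changed: Replaces the dict-of-counts plus max over dict values with sorting the lengths and one linear scan counting the longest run of equal consecutive values (no dict at all).
import Mathlib
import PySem

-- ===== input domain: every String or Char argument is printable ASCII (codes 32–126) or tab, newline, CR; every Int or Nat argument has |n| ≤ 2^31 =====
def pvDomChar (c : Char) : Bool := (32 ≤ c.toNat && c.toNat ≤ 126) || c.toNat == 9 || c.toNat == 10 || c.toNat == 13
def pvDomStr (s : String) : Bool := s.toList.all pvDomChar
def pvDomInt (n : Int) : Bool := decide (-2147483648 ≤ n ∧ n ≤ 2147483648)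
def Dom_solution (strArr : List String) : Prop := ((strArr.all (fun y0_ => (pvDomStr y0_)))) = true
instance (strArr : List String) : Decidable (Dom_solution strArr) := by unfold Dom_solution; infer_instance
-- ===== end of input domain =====

-- B sorts the lengths and scans for the longest run of equal consecutive values; no dict. (objective: alternative)

-- ===== PORT A =====
def solution (strArr : List String) : Int :=
  let m := strArr.foldl (fun (m : PySem.Dict Int Int) s =>
      let k := PySem.Str.len s
      if m.contains k then m.insert k (m.getD k 0 + 1) else m.insert k 1) PySem.Dict.empty
  (PySem.List.max? m.values (fun y => y)).getD 0   -- Pre_ excludes the empty dict, where Python's max raises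

-- ===== PORT B =====
-- one iteration of B's for-loop: state = (best, run, prev)
def solStep (st : Int × Int × Option Int) (L : Int) : Int × Int × Option Int :=
  let run := if st.2.2 = some L then st.2.1 + 1 else 1
  let best := if st.1 < run then run else st.1
  (best, run, some L)

def solution_alt (strArr : List String) : Int :=
  let lengths := PySem.List.sorted (strArr.map (fun s => PySem.Str.len s)) (fun x => x) false
  (lengths.foldl solStep (0, 0, none)).1

-- ===== PRECONDITION & SPEC =====
-- Pre_ excludes only the empty list, on which Python A raises ValueError (max of an empty sequence).
def Pre_solution (strArr : List String) : Prop := strArr ≠ []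
instance (strArr : List String) : Decidable (Pre_solution strArr) := by unfold Pre_solution; infer_instance
def pvWitness_solution : List String := (["a", "bc", "d"])

def Spec_solution (strArr : List String) (out : Int) : Prop := out = solution_alt strArr
instance (strArr : List String) (out : Int) : Decidable (Spec_solution strArr out) := by unfold Spec_solution; infer_instance

-- ===== CLAIM (what is proved, stated in full; the proofs are below) =====
def Claim_equal_solution : Prop := ∀ (strArr : List String), Dom_solution strArr → Pre_solution strArr → Spec_solution strArr (solution strArr)

-- ===== LEMMAS AND PROOFS =====

-- max over positions of "count of the element here"; both sides are shown equal to it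
def mc (l : List Int) : Int := (l.map (fun v => (l.count v : Int))).foldl max 0

lemma foldlmax_nonneg (L : List Int) : 0 ≤ L.foldl max 0 :=
  (PySem.List.le_foldl_max L 0).1

lemma mem_le_foldlmax {L : List Int} {x : Int} (h : x ∈ L) : x ≤ L.foldl max 0 :=
  (PySem.List.le_foldl_max L 0).2 x h

lemma foldlmax_le (L : List Int) (B : Int) (h0 : 0 ≤ B) (h : ∀ x ∈ L, x ≤ B) :
    L.foldl max 0 ≤ B := by
  rcases PySem.List.foldl_max_mem L 0 with h' | h'
  · omega
  · exact h _ h'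

lemma foldlmax_eq_of_mem_iff (V1 V2 : List Int) (h : ∀ x, x ∈ V1 ↔ x ∈ V2) :
    V1.foldl max 0 = V2.foldl max 0 := by
  refine le_antisymm ?_ ?_
  · exact foldlmax_le _ _ (foldlmax_nonneg V2) (fun x hx => mem_le_foldlmax ((h x).1 hx))
  · exact foldlmax_le _ _ (foldlmax_nonneg V1) (fun x hx => mem_le_foldlmax ((h x).2 hx))

lemma mc_snoc (l : List Int) (b : Int) :
    mc (l ++ [b]) = max (mc l) ((l.count b : Int) + 1) := by
  unfold mc
  refine le_antisymm ?_ ?_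
  · refine foldlmax_le _ _ (le_max_of_le_left (foldlmax_nonneg _)) ?_
    intro x hx
    simp only [List.mem_map] at hx
    obtain ⟨v, hv, rfl⟩ := hx
    by_cases hvb : v = b
    · subst hvb
      have : (l ++ [v]).count v = l.count v + 1 := by
        simp [List.count_append]
      rw [this]; push_cast; exact le_max_right _ _
    · have hvl : v ∈ l := by
        rcases List.mem_append.1 hv with h' | h'
        · exact h'
        · simp at h'; exact absurd h' hvb
      have hbv : b ≠ v := Ne.symm hvb
      have : (l ++ [b]).count v = l.count v := by
        simp [List.count_append, hbv]
      rw [this]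
      refine le_max_of_le_left (mem_le_foldlmax ?_)
      exact List.mem_map.2 ⟨v, hvl, rfl⟩
  · refine max_le ?_ ?_
    · refine foldlmax_le _ _ (foldlmax_nonneg _) ?_
      intro x hx
      simp only [List.mem_map] at hx
      obtain ⟨v, hv, rfl⟩ := hx
      have hle : (l.count v : Int) ≤ ((l ++ [b]).count v : Int) := by
        simp [List.count_append]
      refine le_trans hle (mem_le_foldlmax ?_)
      exact List.mem_map.2 ⟨v, List.mem_append_left _ hv, rfl⟩
    · have : ((l ++ [b]).count b : Int) = (l.count b : Int) + 1 := by
        simp [List.count_append]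
      rw [← this]
      refine mem_le_foldlmax (List.mem_map.2 ⟨b, List.mem_append_right _ (by simp), rfl⟩)

lemma scan_loop : ∀ (l₂ l₁ : List Int) (a : Int),
    (l₁ ++ l₂).Pairwise (· ≤ ·) → (∀ x ∈ l₁, x ≤ a) → a ∈ l₁ →
    (l₂.foldl solStep (mc l₁, (l₁.count a : Int), some a)).1 = mc (l₁ ++ l₂) := by
  intro l₂
  induction l₂ with
  | nil => intro l₁ a _ _ _; simp
  | cons b t ih =>
    intro l₁ a hpw hle ha
    have hassoc : l₁ ++ b :: t = (l₁ ++ [b]) ++ t := by simp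
    have hrun : (if (some a : Option Int) = some b then (l₁.count a : Int) + 1 else 1)
        = (l₁.count b : Int) + 1 := by
      by_cases hab : a = b
      · subst hab; simp
      · have hxb : ∀ x ∈ l₁, x ≤ b := by
          intro x hx
          have := (List.pairwise_append.1 hpw).2.2 x hx b (by simp)
          exact this
        have hbl : b ∉ l₁ := by
          intro hbmem
          have h1 : b ≤ a := hle b hbmem
          have h2 : a ≤ b := hxb a ha
          exact hab (le_antisymm h2 h1)
        have : l₁.count b = 0 := List.count_eq_zero.2 hbl
        simp [hab, this]
    have hbest : (if mc l₁ < (l₁.count b : Int) + 1 then (l₁.count b : Int) + 1 else mc l₁)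
        = mc (l₁ ++ [b]) := by
      rw [mc_snoc]
      rcases lt_or_ge (mc l₁) ((l₁.count b : Int) + 1) with h | h
      · simp [h, max_eq_right (le_of_lt h)]
      · have : ¬ mc l₁ < (l₁.count b : Int) + 1 := not_lt.2 h
        simp [this, max_eq_left h]
    have hstep : solStep (mc l₁, (l₁.count a : Int), some a) b
        = (mc (l₁ ++ [b]), ((l₁ ++ [b]).count b : Int), some b) := by
      simp only [solStep, hrun, hbest]
      have : ((l₁ ++ [b]).count b : Int) = (l₁.count b : Int) + 1 := by
        simp [List.count_append]
      rw [this]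
    rw [List.foldl_cons, hstep, hassoc]
    refine ih (l₁ ++ [b]) b ?_ ?_ (by simp)
    · rw [← hassoc]; exact hpw
    · intro x hx
      rcases List.mem_append.1 hx with h' | h'
      · have h1 : x ≤ a := hle x h'
        have h2 : ∀ y ∈ l₁, y ≤ b := fun y hy =>
          (List.pairwise_append.1 hpw).2.2 y hy b (by simp)
        exact h2 x h'
      · simp at h'; simp [h']

lemma mc_one (c : Int) : mc [c] = 1 := by
  unfold mc; simp

-- B's scan equals mc of the length list
lemma alt_eq_mc (strArr : List String) (h : strArr ≠ []) :
    solution_alt strArr = mc (strArr.map (fun s => PySem.Str.len s)) := by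
  set ls := strArr.map (fun s => PySem.Str.len s) with hls
  have hlsne : ls ≠ [] := by
    simp [hls]; exact h
  set sl := PySem.List.sorted ls (fun x => x) false with hsl
  have hperm : sl.Perm ls := PySem.List.sorted_perm ls _ _
  have hslne : sl ≠ [] := by
    intro hnil
    rw [hsl, PySem.List.sorted_eq_nil_iff] at hnil
    exact hlsne hnil
  obtain ⟨c, rest, hcr⟩ := List.exists_cons_of_ne_nil hslne
  have hpw : sl.Pairwise (· ≤ ·) := by
    have := PySem.List.sorted_pairwise ls (fun x => x) (κ := Int)
    simpa using this
  have hfirst : solStep (0, 0, none) c = (1, 1, some c) := by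
    simp [solStep]
  have hmain := scan_loop rest [c] c
    (by rw [List.singleton_append, ← hcr]; exact hpw) (by simp) (by simp)
  have : solution_alt strArr = (sl.foldl solStep (0, 0, none)).1 := rfl
  rw [this, hcr, List.foldl_cons, hfirst]
  have hcount : ([c].count c : Int) = 1 := by simp
  have := hmain
  rw [mc_one, hcount] at this
  rw [this, List.singleton_append, ← hcr]
  unfold mc
  refine foldlmax_eq_of_mem_iff _ _ ?_
  intro x
  simp only [List.mem_map]
  constructor
  · rintro ⟨v, hv, rfl⟩
    exact ⟨v, hperm.mem_iff.1 hv, by rw [hperm.count_eq]⟩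
  · rintro ⟨v, hv, rfl⟩
    exact ⟨v, hperm.mem_iff.2 hv, by rw [hperm.count_eq]⟩

-- A's dict is Counter(lengths)
lemma a_dict_eq_counter (strArr : List String) :
    strArr.foldl (fun (m : PySem.Dict Int Int) s =>
      let k := PySem.Str.len s
      if m.contains k then m.insert k (m.getD k 0 + 1) else m.insert k 1) PySem.Dict.empty
    = PySem.Dict.counter (strArr.map (fun s => PySem.Str.len s)) := by
  rw [← PySem.Dict.foldl_insert_getD_add_one_eq_counter, List.foldl_map]
  have hfun : (fun (m : PySem.Dict Int Int) s =>
      let k := PySem.Str.len s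
      if m.contains k then m.insert k (m.getD k 0 + 1) else m.insert k 1)
      = (fun (d : PySem.Dict Int Int) (x : String) =>
          d.insert (PySem.Str.len x) (d.getD (PySem.Str.len x) 0 + 1)) := by
    funext d s
    show (if d.contains (PySem.Str.len s)
        then d.insert (PySem.Str.len s) (d.getD (PySem.Str.len s) 0 + 1)
        else d.insert (PySem.Str.len s) 1)
      = d.insert (PySem.Str.len s) (d.getD (PySem.Str.len s) 0 + 1)
    by_cases hc : d.contains (PySem.Str.len s)
    · rw [if_pos hc]
    · have hb : d.contains (PySem.Str.len s) = false := by simpa using hc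
      have h0 : d.getD (PySem.Str.len s) 0 = 0 :=
        PySem.Dict.getD_of_not_contains (h := hb) ..
      rw [if_neg hc, h0]
      norm_num
  rw [hfun]

-- A equals mc of the length list
lemma a_eq_mc (strArr : List String) (h : strArr ≠ []) :
    solution strArr = mc (strArr.map (fun s => PySem.Str.len s)) := by
  set ls := strArr.map (fun s => PySem.Str.len s) with hls
  have hlsne : ls ≠ [] := by simp [hls]; exact h
  have hvals : (PySem.Dict.counter ls).values
      = (PySem.Set.ofList ls).map (fun k => (ls.count k : Int)) := by
    show (PySem.Dict.counter ls).items.map (·.2) = _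
    rw [PySem.Dict.items_counter, List.map_map]
    rfl
  have hsolution : solution strArr
      = (PySem.List.max? ((PySem.Set.ofList ls).map (fun k => (ls.count k : Int))) (fun y => y)).getD 0 := by
    show (PySem.List.max? ((strArr.foldl _ PySem.Dict.empty).values) (fun y => y)).getD 0 = _
    rw [a_dict_eq_counter, hvals]
  obtain ⟨k0, ks, hks⟩ : ∃ k0 ks, PySem.Set.ofList ls = k0 :: ks := by
    obtain ⟨x, xs, hxs⟩ := List.exists_cons_of_ne_nil hlsne
    have : x ∈ PySem.Set.ofList ls := (PySem.Set.mem_ofList _ _).2 (by rw [hxs]; simp)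
    cases hset : PySem.Set.ofList ls with
    | nil => rw [hset] at this; simp at this
    | cons a b => exact ⟨a, b, rfl⟩
  have hpos : ∀ k ∈ PySem.Set.ofList ls, (1 : Int) ≤ (ls.count k : Int) := by
    intro k hk
    have : 0 < ls.count k := List.count_pos_iff.2 ((PySem.Set.mem_ofList _ _).1 hk)
    exact_mod_cast this
  rw [hsolution, hks, List.map_cons, PySem.List.max?_id_cons, Option.getD_some]
  have hv1 : (1 : Int) ≤ (ls.count k0 : Int) := hpos k0 (by rw [hks]; simp)
  have hfold0 : ((ls.count k0 : Int) :: ks.map (fun k => (ls.count k : Int))).foldl max 0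
      = (ks.map (fun k => (ls.count k : Int))).foldl max (ls.count k0 : Int) := by
    have hmx : max 0 (ls.count k0 : Int) = (ls.count k0 : Int) := by omega
    rw [List.foldl_cons, hmx]
  have hconsmap : (ls.count k0 : Int) :: ks.map (fun k => (ls.count k : Int))
      = (k0 :: ks).map (fun k => (ls.count k : Int)) := by simp
  have hmceq : ((k0 :: ks).map (fun k => (ls.count k : Int))).foldl max 0 = mc ls := by
    rw [← hks]
    unfold mc
    refine foldlmax_eq_of_mem_iff _ _ ?_
    intro x
    simp only [List.mem_map]
    constructor
    · rintro ⟨v, hv, rfl⟩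
      exact ⟨v, (PySem.Set.mem_ofList _ _).1 hv, rfl⟩
    · rintro ⟨v, hv, rfl⟩
      exact ⟨v, (PySem.Set.mem_ofList _ _).2 hv, rfl⟩
  rw [← hfold0, hconsmap, hmceq]

-- ===== VERDICT (by name: the statement is the Claim_ definition above) =====
theorem solution_spec : Claim_equal_solution := by
  intro strArr _ hpre
  unfold Spec_solution
  rw [a_eq_mc strArr hpre, alt_eq_mc strArr hpre]
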